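-- pv_equiv track=rewrite | github.com/TidalCub/TidalTec | modules.py | formatedlist
-- ===== SOURCE A (Python) =====
-- def formatedlist(cart):
--     rangenum = int(len(cart)/5)
--     cart = list(cart)
--     templist = []
--     formatedlist = []
--
--     for i in range(rangenum):
--         templist.append(i)
--         for j in range(0,5):
--
--             templist.append(cart[j])
--         for a in range(0,5):
--             cart.pop(0)
--
--
--         formatedlist.append(templist)
--         templist = []
--
--     return formatedlist
-- ===== SOURCE B (Python) =====
-- def formatedlist(cart):
--     # Single pass: buffer elements; every full buffer of five becomes an
--     # indexed chunk; a trailing partial buffer is discarded.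
--     result = []
--     buf = []
--     counter = 0
--     for x in cart:
--         buf.append(x)
--         if len(buf) == 5:
--             result.append([counter] + buf)
--             counter += 1
--             buf = []
--     return result
-- ===== Notes on version B (the rewrite author's own statement) =====
-- stated objective: faster
-- what changed: Replaces A's precomputed range count with index slicing and quadratic repeated pop(0) by a single linear pass over the elements maintaining a five-element buffer and a chunk counter; partial trailing buffers are discarded as in A.
import Mathlib
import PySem

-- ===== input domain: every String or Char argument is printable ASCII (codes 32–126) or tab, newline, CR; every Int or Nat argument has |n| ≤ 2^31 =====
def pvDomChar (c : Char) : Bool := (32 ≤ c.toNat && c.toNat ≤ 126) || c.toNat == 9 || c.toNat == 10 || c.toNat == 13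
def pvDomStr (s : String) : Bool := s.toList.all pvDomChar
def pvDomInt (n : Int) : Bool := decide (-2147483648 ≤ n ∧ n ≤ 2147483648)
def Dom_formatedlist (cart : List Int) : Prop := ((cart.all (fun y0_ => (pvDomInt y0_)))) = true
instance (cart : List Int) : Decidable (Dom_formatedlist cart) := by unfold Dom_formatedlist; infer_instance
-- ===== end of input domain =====

-- B replaces A's slice-and-repeated-pop(0) chunking by a single buffered pass; same return value.

-- ===== PORT A =====
-- inner 'for j in range(0,5): templist.append(cart[j])' (indices are in range whenever A runs it)
def aInner (cart : List Int) : List Int :=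
  (PySem.List.pyRange 0 5 1).foldl (fun t j => t ++ [PySem.List.pyGetD cart j 0]) []

-- 'for a in range(0,5): cart.pop(0)' (the list has ≥ 5 elements whenever A runs it)
def aPop (cart : List Int) : List Int :=
  (PySem.List.pyRange 0 5 1).foldl (fun c _ => c.drop 1) cart

-- 'for i in range(rangenum): …' as structural recursion on the remaining count
def aLoop : Nat → Int → List Int → List (List Int) → List (List Int)
  | 0, _, _, acc => acc
  | n + 1, i, cart, acc => aLoop n (i + 1) (aPop cart) (acc ++ [[i] ++ aInner cart])

def formatedlist (cart : List Int) : List (List Int) :=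
  aLoop (cart.length / 5) 0 cart []

-- ===== PORT B =====
def bLoop : List Int → List Int → Int → List (List Int)
  | [], _, _ => []
  | x :: xs, buf, c =>
      let buf' := buf ++ [x]
      if buf'.length = 5 then (c :: buf') :: bLoop xs [] (c + 1)
      else bLoop xs buf' c

def formatedlist_alt (cart : List Int) : List (List Int) :=
  bLoop cart [] 0

-- ===== PRECONDITION & SPEC =====
def Spec_formatedlist (cart : List Int) (out : List (List Int)) : Prop := out = formatedlist_alt cart
instance (cart : List Int) (out : List (List Int)) : Decidable (Spec_formatedlist cart out) := by unfold Spec_formatedlist; infer_instance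

-- ===== CLAIM (what is proved, stated in full; the proofs are below) =====
def Claim_equal_formatedlist : Prop := ∀ (cart : List Int), Dom_formatedlist cart → Spec_formatedlist cart (formatedlist cart)

-- ===== LEMMAS AND PROOFS =====

theorem aInner_cons5 (a b c d e : Int) (rest : List Int) :
    aInner (a :: b :: c :: d :: e :: rest) = [a, b, c, d, e] := by
  simp [aInner, show PySem.List.pyRange 0 5 1 = [0, 1, 2, 3, 4] from by decide,
        PySem.List.pyGetD, PySem.List.pyGet?, PySem.List.pyIdx?, List.foldl]
  refine ⟨?_, ?_, ?_, ?_, ?_⟩ <;> rw [if_pos (by omega)] <;> simp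

theorem aPop_cons5 (a b c d e : Int) (rest : List Int) :
    aPop (a :: b :: c :: d :: e :: rest) = rest := by
  simp [aPop, show PySem.List.pyRange 0 5 1 = [0, 1, 2, 3, 4] from by decide, List.foldl]

theorem bLoop_short (cart : List Int) (i : Int) (h : cart.length < 5) :
    bLoop cart [] i = [] := by
  rcases cart with _ | ⟨a, _ | ⟨b, _ | ⟨c, _ | ⟨d, _ | ⟨e, rest⟩⟩⟩⟩⟩ <;> simp_all [bLoop]
  omega

theorem bLoop_cons5 (a b c d e : Int) (rest : List Int) (i : Int) :
    bLoop (a :: b :: c :: d :: e :: rest) [] i = [i, a, b, c, d, e] :: bLoop rest [] (i + 1) := by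
  simp [bLoop]

theorem aLoop_eq_bLoop : ∀ (n : Nat) (i : Int) (cart : List Int) (acc : List (List Int)),
    cart.length / 5 = n → aLoop n i cart acc = acc ++ bLoop cart [] i := by
  intro n
  induction n with
  | zero =>
    intro i cart acc h
    rw [aLoop, bLoop_short cart i (by omega), List.append_nil]
  | succ n ih =>
    intro i cart acc h
    have hlen : 5 ≤ cart.length := by omega
    rcases cart with _ | ⟨a, _ | ⟨b, _ | ⟨c, _ | ⟨d, _ | ⟨e, rest⟩⟩⟩⟩⟩ <;> simp at hlen
    rw [aLoop, aInner_cons5, aPop_cons5, ih (i + 1) rest _ (by simp at h ⊢; omega),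
        bLoop_cons5]
    simp

-- ===== VERDICT (by name: the statement is the Claim_ definition above) =====
theorem formatedlist_spec : Claim_equal_formatedlist := by
  intro cart _
  unfold Spec_formatedlist formatedlist formatedlist_alt
  simpa using aLoop_eq_bLoop (cart.length / 5) 0 cart [] rfl
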